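-- pv_equiv track=rewrite | github.com/lizhihui0215/black-tonny-backend-base | scripts/_collab_common.py | boundary_flags
-- ===== SOURCE A (Python) =====
-- def has_prefix(paths: list[str], prefixes: tuple[str, ...]) -> bool:
--     return any(path.startswith(prefixes) for path in paths)
--
-- def boundary_flags(paths: list[str]) -> dict[str, bool]:
--     return {
--         "research": any("research" in path for path in paths) or has_prefix(paths, ("docs/erp/",)),
--         "capture": any("capture" in path for path in paths)
--         or has_prefix(paths, ("src/migrations/capture_versions/", "docs/capture")),
--         "serving": any("serving" in path for path in paths),
--         "runtime": has_prefix(paths, ("src/app/", "src/api/", "src/core/", "src/scripts/")),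
--         "api_behavior": has_prefix(paths, ("src/app/api/", "src/app/routes/", "src/api/")),
--     }
-- ===== SOURCE B (Python) =====
-- def boundary_flags(paths: list[str]) -> dict[str, bool]:
--     research = capture = serving = runtime = api_behavior = False
--     for p in paths:
--         research = research or "research" in p or p.startswith("docs/erp/")
--         capture = capture or "capture" in p or p.startswith(
--             ("src/migrations/capture_versions/", "docs/capture"))
--         serving = serving or "serving" in p
--         runtime = runtime or p.startswith(("src/app/", "src/api/", "src/core/", "src/scripts/"))
--         api_behavior = api_behavior or p.startswith(("src/app/api/", "src/app/routes/", "src/api/"))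
--     return {
--         "research": research,
--         "capture": capture,
--         "serving": serving,
--         "runtime": runtime,
--         "api_behavior": api_behavior,
--     }
-- ===== Notes on version B (the rewrite author's own statement) =====
-- stated objective: alternative
-- what changed: Replaced the eight independent any()/has_prefix scans over paths with a single loop maintaining five boolean accumulators, OR-ing each path's combined substring/prefix test into its flag.
import Mathlib
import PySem

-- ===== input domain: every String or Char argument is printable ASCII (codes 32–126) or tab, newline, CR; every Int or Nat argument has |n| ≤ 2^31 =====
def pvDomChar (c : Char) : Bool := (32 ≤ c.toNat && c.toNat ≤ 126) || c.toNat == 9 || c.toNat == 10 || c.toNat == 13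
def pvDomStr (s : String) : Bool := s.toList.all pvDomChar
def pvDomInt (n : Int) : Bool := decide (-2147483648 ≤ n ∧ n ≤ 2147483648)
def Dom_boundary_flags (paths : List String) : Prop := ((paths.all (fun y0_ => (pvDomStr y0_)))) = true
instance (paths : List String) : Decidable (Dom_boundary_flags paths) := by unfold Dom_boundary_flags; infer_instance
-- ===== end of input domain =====

-- B replaces A's eight independent scans of `paths` with one loop over `paths`
-- maintaining five boolean accumulators (objective: alternative decomposition).

-- ===== PORT A =====
def has_prefix (paths : List String) (prefixes : List String) : Bool :=
  paths.any (fun path => prefixes.any (fun pre => PySem.Str.startswith path pre))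

def boundary_flags (paths : List String) : List (String × Bool) :=
  [("research", paths.any (fun path => PySem.Str.isIn "research" path) || has_prefix paths ["docs/erp/"]),
   ("capture", paths.any (fun path => PySem.Str.isIn "capture" path)
      || has_prefix paths ["src/migrations/capture_versions/", "docs/capture"]),
   ("serving", paths.any (fun path => PySem.Str.isIn "serving" path)),
   ("runtime", has_prefix paths ["src/app/", "src/api/", "src/core/", "src/scripts/"]),
   ("api_behavior", has_prefix paths ["src/app/api/", "src/app/routes/", "src/api/"])]

-- ===== PORT B =====
def boundary_flags_alt (paths : List String) : List (String × Bool) :=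
  let st := paths.foldl
    (fun (s : Bool × Bool × Bool × Bool × Bool) p =>
      (s.1 || PySem.Str.isIn "research" p || PySem.Str.startswith p "docs/erp/",
       s.2.1 || PySem.Str.isIn "capture" p
         || (PySem.Str.startswith p "src/migrations/capture_versions/" || PySem.Str.startswith p "docs/capture"),
       s.2.2.1 || PySem.Str.isIn "serving" p,
       s.2.2.2.1 || (PySem.Str.startswith p "src/app/" || PySem.Str.startswith p "src/api/"
         || PySem.Str.startswith p "src/core/" || PySem.Str.startswith p "src/scripts/"),
       s.2.2.2.2 || (PySem.Str.startswith p "src/app/api/" || PySem.Str.startswith p "src/app/routes/"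
         || PySem.Str.startswith p "src/api/")))
    (false, false, false, false, false)
  [("research", st.1), ("capture", st.2.1), ("serving", st.2.2.1),
   ("runtime", st.2.2.2.1), ("api_behavior", st.2.2.2.2)]

-- ===== PRECONDITION & SPEC =====
def Spec_boundary_flags (paths : List String) (out : List (String × Bool)) : Prop := out = boundary_flags_alt paths
instance (paths : List String) (out : List (String × Bool)) : Decidable (Spec_boundary_flags paths out) := by unfold Spec_boundary_flags; infer_instance

-- ===== CLAIM (what is proved, stated in full; the proofs are below) =====
def Claim_equal_boundary_flags : Prop := ∀ (paths : List String), Dom_boundary_flags paths → Spec_boundary_flags paths (boundary_flags paths)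

-- ===== LEMMAS AND PROOFS =====

-- the single-pass fold computes, in each component, the OR of the accumulator with an `any` scan
theorem pv_fold_eq (f1 f2 f3 f4 f5 : String → Bool) :
    ∀ (paths : List String) (a b c d e : Bool),
      paths.foldl
        (fun (s : Bool × Bool × Bool × Bool × Bool) p =>
          (s.1 || f1 p, s.2.1 || f2 p, s.2.2.1 || f3 p, s.2.2.2.1 || f4 p, s.2.2.2.2 || f5 p))
        (a, b, c, d, e)
      = (a || paths.any f1, b || paths.any f2, c || paths.any f3,
         d || paths.any f4, e || paths.any f5) := by
  intro paths
  induction paths with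
  | nil => simp
  | cons p t ih =>
      intro a b c d e
      simp [List.foldl_cons, ih, Bool.or_assoc]

-- an `any` of a disjunction splits into the disjunction of two `any` scans
theorem pv_any_or {α : Type} (l : List α) (f g : α → Bool) :
    l.any (fun x => f x || g x) = (l.any f || l.any g) := by
  induction l with
  | nil => simp
  | cons x t ih =>
      simp [List.any_cons, ih, Bool.or_assoc, Bool.or_left_comm]

-- ===== VERDICT (by name: the statement is the Claim_ definition above) =====
theorem boundary_flags_spec : Claim_equal_boundary_flags := by
  intro paths _
  show boundary_flags paths = boundary_flags_alt paths
  simp only [boundary_flags, boundary_flags_alt, has_prefix, pv_fold_eq, pv_any_or,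
    List.any_cons, List.any_nil, Bool.or_false, Bool.false_or, Bool.or_assoc]
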